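-- pv_equiv track=rewrite | github.com/prettyleaf/cdn | scripts/collect_discord_voice_ips.py | extract_voice_domains
-- ===== SOURCE A (Python) =====
-- from collections import defaultdict
-- from typing import Iterable, Sequence
--
-- def _match_region_label(label: str, ordered_regions: Sequence[str]) -> str | None:
--     for region in ordered_regions:
--         if not label.startswith(region):
--             continue
--         suffix = label[len(region) :]
--         if not suffix:
--             return region
--         if suffix.startswith("-"):
--             suffix = suffix[1:]
--         if suffix.isdigit():
--             return region
--     return None
--
-- def extract_voice_domains(domains: Iterable[str], regions: Sequence[str]) -> dict[str, set[str]]: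
--     regions_sorted = sorted(set(regions), key=len, reverse=True)
--     result: dict[str, set[str]] = defaultdict(set)
--
--     for host in domains:
--         host = host.strip().lower()
--         if not host:
--             continue
--         if host.startswith("*."):
--             host = host[2:]
--         if not host.endswith(".discord.gg"):
--             continue
--
--         label = host[: -len(".discord.gg")]
--         if not label:
--             continue
--
--         matched_region = _match_region_label(label, regions_sorted)
--         if matched_region is None:
--             continue
--         result[matched_region].add(host)
--
--     return result
-- ===== SOURCE B (Python) =====
-- def extract_voice_domains(domains, regions):
--     region_set = set(regions)
--     result = {}
--     for host in domains:
--         host = host.strip().lower()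
--         if not host:
--             continue
--         if host.startswith("*."):
--             host = host[2:]
--         if not host.endswith(".discord.gg"):
--             continue
--         label = host[: -len(".discord.gg")]
--         if not label:
--             continue
--         # i = start of the maximal trailing run of digit characters
--         i = len(label)
--         while i > 0 and label[i - 1].isdigit():
--             i -= 1
--         # longest-first: label[:j] for j = len(label) .. i (empty or all-digit suffix),
--         # then the single stripped-hyphen candidate label[:i-1]
--         match = None
--         j = len(label)
--         while j >= i:
--             if label[:j] in region_set:
--                 match = label[:j]
--                 break
--             j -= 1
--         if match is None and 0 < i < len(label) and label[i - 1] == "-" and label[: i - 1] in region_set: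
--             match = label[: i - 1]
--         if match is None:
--             continue
--         result.setdefault(match, set()).add(host)
--     return result
-- ===== Notes on version B (the rewrite author's own statement) =====
-- stated objective: alternative
-- what changed: Instead of scanning every length-sorted region per host, B computes the start of the label's maximal trailing digit run and probes the label's own candidate prefixes (longest first, plus the single stripped-hyphen candidate) against a set of the regions, so per-host matching does not iterate over the region list.
import Mathlib
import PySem

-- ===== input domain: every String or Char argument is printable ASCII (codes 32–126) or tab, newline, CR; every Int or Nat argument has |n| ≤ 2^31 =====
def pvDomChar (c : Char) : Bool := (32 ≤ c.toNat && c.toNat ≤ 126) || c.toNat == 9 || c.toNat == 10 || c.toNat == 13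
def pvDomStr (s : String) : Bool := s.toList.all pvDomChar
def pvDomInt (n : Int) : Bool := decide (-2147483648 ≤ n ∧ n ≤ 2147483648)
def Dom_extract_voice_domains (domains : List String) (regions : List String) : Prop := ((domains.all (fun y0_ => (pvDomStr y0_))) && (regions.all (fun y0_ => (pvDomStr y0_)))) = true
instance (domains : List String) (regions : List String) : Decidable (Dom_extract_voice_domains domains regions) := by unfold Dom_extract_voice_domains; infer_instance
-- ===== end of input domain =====

-- B replaces A's scan over all length-sorted regions per host by a longest-first lookup of the
-- label's own candidate prefixes (positions around its trailing digit run) in a region set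
-- (objective: alternative algorithm). Return values only (no argument is mutated).

-- ===== PORT A =====
-- _match_region_label: first region in the ordered list that is a prefix of label whose
-- remainder is empty, or (after stripping one '-') all digits.
def pvMatchRegionLabel (label : String) : List String → Option String
  | [] => none
  | region :: rest =>
    if !(PySem.Str.startswith label region) then pvMatchRegionLabel label rest
    else
      -- suffix = label[len(region):]
      let suffix := PySem.Str.slice label (some (PySem.Str.len region)) none
      if suffix = "" then some region
      else
        let suffix := if PySem.Str.startswith suffix "-" then PySem.Str.slice suffix (some 1) none else suffix
        if PySem.Str.strIsdigit suffix then some region else pvMatchRegionLabel label rest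

def extract_voice_domains (domains : List String) (regions : List String) : List (String × List String) :=
  -- regions_sorted = sorted(set(regions), key=len, reverse=True)
  let regionsSorted := PySem.List.sorted (PySem.Set.ofList regions) PySem.Str.len true
  (domains.foldl (fun (result : PySem.Dict String (PySem.Set String)) host =>
      let host := PySem.Str.lower (PySem.Str.strip host)
      if host = "" then result
      else
        let host := if PySem.Str.startswith host "*." then PySem.Str.slice host (some 2) none else host
        if !(PySem.Str.endswith host ".discord.gg") then result
        else
          let label := PySem.Str.slice host none (some (-(PySem.Str.len ".discord.gg")))
          if label = "" then result
          else
            match pvMatchRegionLabel label regionsSorted with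
            | none => result
            | some r => result.modify r PySem.Set.empty (fun s => PySem.Set.add s host)  -- defaultdict: result[r].add(host)
    ) PySem.Dict.empty).items

-- ===== PORT B =====
-- i = len(label); while i > 0 and label[i-1].isdigit(): i -= 1      (getD is exact: i-1 is in range)
def pvDigitRunStart (l : List Char) : Nat → Nat
  | 0 => 0
  | i + 1 => if PySem.Chars.isdigit (l.getD i ' ') then pvDigitRunStart l i else i + 1

-- j = len(label); while j >= i: if label[:j] in region_set: return label[:j]; j -= 1
-- (label[:j] with 0 ≤ j ≤ len is exactly List.take j)
def pvSearchDown (S : PySem.Set String) (l : List Char) (i : Nat) (j : Nat) : Option String :=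
  if PySem.Set.contains S (String.ofList (l.take j)) then some (String.ofList (l.take j))
  else if j ≤ i then none
  else pvSearchDown S l i (j - 1)
termination_by j
decreasing_by omega

def pvMatchLabelB (S : PySem.Set String) (label : String) : Option String :=
  let l := label.toList
  let i := pvDigitRunStart l l.length
  match pvSearchDown S l i l.length with
  | some r => some r
  | none =>
    -- the single stripped-hyphen candidate label[:i-1]
    if 0 < i ∧ i < l.length ∧ l.getD (i - 1) ' ' = '-' ∧ PySem.Set.contains S (String.ofList (l.take (i - 1))) then
      some (String.ofList (l.take (i - 1)))
    else none

def extract_voice_domains_alt (domains : List String) (regions : List String) : List (String × List String) :=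
  let regionSet := PySem.Set.ofList regions
  (domains.foldl (fun (result : PySem.Dict String (PySem.Set String)) host =>
      let host := PySem.Str.lower (PySem.Str.strip host)
      if host = "" then result
      else
        let host := if PySem.Str.startswith host "*." then PySem.Str.slice host (some 2) none else host
        if !(PySem.Str.endswith host ".discord.gg") then result
        else
          let label := PySem.Str.slice host none (some (-(PySem.Str.len ".discord.gg")))
          if label = "" then result
          else
            match pvMatchLabelB regionSet label with
            | none => result
            | some r => result.insert r (PySem.Set.add (result.getD r PySem.Set.empty) host)  -- setdefault(r, set()).add(host)
    ) PySem.Dict.empty).items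

-- ===== PRECONDITION & SPEC =====
def Spec_extract_voice_domains (domains : List String) (regions : List String) (out : List (String × List String)) : Prop := out = extract_voice_domains_alt domains regions
instance (domains : List String) (regions : List String) (out : List (String × List String)) : Decidable (Spec_extract_voice_domains domains regions out) := by unfold Spec_extract_voice_domains; infer_instance

-- ===== CLAIM (what is proved, stated in full; the proofs are below) =====
def Claim_equal_extract_voice_domains : Prop := ∀ (domains : List String) (regions : List String), Dom_extract_voice_domains domains regions → Spec_extract_voice_domains domains regions (extract_voice_domains domains regions)

-- ===== LEMMAS AND PROOFS =====

-- The candidate cut positions of a label, longest first: all j with i ≤ j ≤ n (empty or all-digit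
-- suffix) followed by the stripped-hyphen position i-1 when applicable.
def pvJs (l : List Char) : List Nat :=
  ((List.range (l.length + 1 - pvDigitRunStart l l.length)).map (fun k => l.length - k)) ++
  (if 0 < pvDigitRunStart l l.length ∧ pvDigitRunStart l l.length < l.length ∧
      l.getD (pvDigitRunStart l l.length - 1) ' ' = '-' then [pvDigitRunStart l l.length - 1] else [])

-- the per-region test of A's loop
def pvCond (label r : String) : Bool :=
  PySem.Str.startswith label r &&
  (let suffix := PySem.Str.slice label (some (PySem.Str.len r)) none
   decide (suffix = "") ||
     PySem.Str.strIsdigit (if PySem.Str.startswith suffix "-" then PySem.Str.slice suffix (some 1) none else suffix))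

lemma pvMatch_eq_find? (label : String) (rs : List String) :
    pvMatchRegionLabel label rs = rs.find? (pvCond label) := by
  induction rs with
  | nil => rfl
  | cons region rest ih =>
    by_cases hc : pvCond label region = true
    · rw [List.find?_cons_of_pos hc]
      have hc' := hc
      simp only [pvCond, Bool.and_eq_true, Bool.or_eq_true, decide_eq_true_eq] at hc'
      obtain ⟨h1, hor⟩ := hc'
      simp only [pvMatchRegionLabel, h1, Bool.not_true, Bool.false_eq_true, if_false]
      by_cases h2 : PySem.Str.slice label (some (PySem.Str.len region)) none = ""
      · rw [if_pos h2]
      · rw [if_neg h2, if_pos (hor.resolve_left h2)]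
    · rw [List.find?_cons_of_neg (by simpa using hc), ← ih]
      simp only [pvCond, Bool.and_eq_true, Bool.or_eq_true, decide_eq_true_eq, not_and, not_or] at hc
      by_cases h1 : PySem.Str.startswith label region = true
      · obtain ⟨h2, h3⟩ := hc h1
        simp only [pvMatchRegionLabel, h1, Bool.not_true, Bool.false_eq_true, if_false,
          if_neg h2, if_neg h3]
      · have h1' : PySem.Chars.startswith label.toList region.toList = false := by
          simpa [PySem.Str.startswith] using h1
        simp [pvMatchRegionLabel, h1']

lemma pvDigitRunStart_le (l : List Char) (m : Nat) : pvDigitRunStart l m ≤ m := by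
  induction m with
  | zero => simp [pvDigitRunStart]
  | succ i ih => unfold pvDigitRunStart; split <;> omega

lemma pvDigitRunStart_digits (l : List Char) (m : Nat) : ∀ k, pvDigitRunStart l m ≤ k → k < m →
    PySem.Chars.isdigit (l.getD k ' ') = true := by
  induction m with
  | zero => omega
  | succ i ih =>
    intro k h1 h2
    unfold pvDigitRunStart at h1
    split at h1
    · rcases Nat.lt_succ_iff_lt_or_eq.mp h2 with h | h
      · exact ih k h1 h
      · subst h; assumption
    · omega

lemma pvDigitRunStart_stop (l : List Char) (m : Nat) (h : 0 < pvDigitRunStart l m) :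
    PySem.Chars.isdigit (l.getD (pvDigitRunStart l m - 1) ' ') = false := by
  induction m with
  | zero => simp [pvDigitRunStart] at h
  | succ i ih =>
    unfold pvDigitRunStart at h ⊢
    by_cases hd : PySem.Chars.isdigit (l.getD i ' ') = true
    · simp only [hd, if_true] at h ⊢; exact ih h
    · simp only [hd] at h ⊢; simpa using hd

-- all-digit suffix ⟷ the cut is at or after the start of the trailing digit run
lemma pv_digitRun_iff (l : List Char) (j : Nat) (hj : j ≤ l.length) :
    (∀ c ∈ l.drop j, PySem.Chars.isdigit c = true) ↔ pvDigitRunStart l l.length ≤ j := by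
  constructor
  · intro h
    by_contra hlt
    rw [Nat.not_le] at hlt
    set i := pvDigitRunStart l l.length with hi
    have hile : i ≤ l.length := pvDigitRunStart_le l l.length
    have hpos : 0 < i := by omega
    have hstop := pvDigitRunStart_stop l l.length hpos
    have hmem : l.getD (i-1) ' ' ∈ l.drop j := by
      have : (i-1) < l.length := by omega
      rw [List.getD_eq_getElem l ' ' this]
      have h2 : i - 1 - j < (l.drop j).length := by simp; omega
      refine List.mem_iff_getElem.mpr ⟨i-1-j, h2, ?_⟩
      rw [List.getElem_drop]
      congr 1
      omega
    have := h _ hmem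
    rw [hstop] at this
    exact absurd this (by simp)
  · intro h c hc
    obtain ⟨k, hk, rfl⟩ := List.mem_iff_getElem.mp hc
    have h2 := List.getElem_drop (xs := l) (i := j) (j := k) (h := by simpa using hk)
    rw [h2]
    have hlen : k < (l.drop j).length := hk
    simp at hlen
    rw [← List.getD_eq_getElem l ' ' (by omega)]
    exact pvDigitRunStart_digits l l.length (j + k) (by omega) (by omega)

lemma pv_mem_pvJs_le (l : List Char) (j : Nat) (h : j ∈ pvJs l) : j ≤ l.length := by
  have hle := pvDigitRunStart_le l l.length
  unfold pvJs at h
  rcases List.mem_append.mp h with h | h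
  · obtain ⟨k, hk, rfl⟩ := List.mem_map.mp h
    omega
  · split at h
    · simp at h
      omega
    · simp at h

lemma pv_pairwise_pvJs (l : List Char) : (pvJs l).Pairwise (fun a b => b < a) := by
  have hle := pvDigitRunStart_le l l.length
  unfold pvJs
  rw [List.pairwise_append]
  refine ⟨?_, ?_, ?_⟩
  · rw [List.pairwise_map]
    refine List.Pairwise.imp_of_mem ?_ List.pairwise_lt_range
    intro a b ha hb hab
    simp only [List.mem_range] at ha hb
    omega
  · split <;> simp
  · intro a ha b hb
    obtain ⟨k, hk, rfl⟩ := List.mem_map.mp ha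
    simp only [List.mem_range] at hk
    split at hb
    · rename_i hg
      simp only [List.mem_singleton] at hb
      omega
    · simp at hb

-- A's per-region test holds exactly for the candidate prefixes of the label
lemma pv_mem_first (l : List Char) (j : Nat) :
    j ∈ (List.range (l.length + 1 - pvDigitRunStart l l.length)).map (fun k => l.length - k)
      ↔ pvDigitRunStart l l.length ≤ j ∧ j ≤ l.length := by
  have hle := pvDigitRunStart_le l l.length
  simp only [List.mem_map, List.mem_range]
  constructor
  · rintro ⟨k, hk, rfl⟩; omega
  · rintro ⟨h1, h2⟩; exact ⟨l.length - j, by omega, by omega⟩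

lemma pv_cond_chars_iff (l : List Char) (j : Nat) (hj : j ≤ l.length) :
    (l.drop j = [] ∨ PySem.Chars.strIsdigit (if PySem.Chars.startswith (l.drop j) ['-'] = true then (l.drop j).tail else l.drop j) = true)
      ↔ j ∈ pvJs l := by
  have hle := pvDigitRunStart_le l l.length
  by_cases hjn : j = l.length
  · subst hjn
    simp only [List.drop_length, true_or, true_iff]
    unfold pvJs
    exact List.mem_append.mpr (Or.inl ((pv_mem_first l l.length).mpr ⟨hle, le_refl _⟩))
  · have hjlt : j < l.length := by omega
    have hdrop : l.drop j = l[j] :: l.drop (j+1) := List.drop_eq_getElem_cons hjlt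
    have hgetD : l.getD j ' ' = l[j] := List.getD_eq_getElem l ' ' hjlt
    by_cases hc : l[j] = '-'
    · have hsw : PySem.Chars.startswith (l.drop j) ['-'] = true := by
        rw [hdrop, PySem.Chars.startswith_iff, hc]
        exact ⟨l.drop (j+1), rfl⟩
      have hnd : ¬ PySem.Chars.isdigit l[j] = true := by rw [hc]; decide
      have hji : j < pvDigitRunStart l l.length := by
        by_contra hge
        exact hnd (hgetD ▸ pvDigitRunStart_digits l l.length j (by omega) hjlt)
      rw [hsw]
      simp only [if_true, hdrop, List.tail_cons, reduceCtorEq, false_or]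
      have h1 : PySem.Chars.strIsdigit (l.drop (j+1)) = true ↔
          (l.drop (j+1) ≠ [] ∧ ∀ c ∈ l.drop (j+1), PySem.Chars.isdigit c = true) := by
        simp [PySem.Chars.strIsdigit, List.all_eq_true]
      rw [h1, pv_digitRun_iff l (j+1) (by omega), List.ne_nil_iff_length_pos, List.length_drop]
      unfold pvJs
      rw [List.mem_append, pv_mem_first]
      constructor
      · rintro ⟨hne, hi1⟩
        have hij : j = pvDigitRunStart l l.length - 1 := by omega
        refine Or.inr ?_
        rw [if_pos ⟨by omega, by omega, by rw [← hij, hgetD, hc]⟩]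
        exact List.mem_singleton.mpr hij
      · rintro (⟨hi, _⟩ | hmem)
        · omega
        · split at hmem
          · rename_i hg
            simp only [List.mem_singleton] at hmem
            omega
          · simp at hmem
    · have hsw : PySem.Chars.startswith (l.drop j) ['-'] = false := by
        rw [Bool.eq_false_iff, Ne, PySem.Chars.startswith_iff, hdrop]
        intro hpre
        exact hc (List.cons_prefix_cons.mp hpre).1.symm
      rw [hsw]
      have hne : l.drop j ≠ [] := by rw [List.ne_nil_iff_length_pos, List.length_drop]; omega
      simp only [Bool.false_eq_true, if_false]
      rw [or_iff_right hne]
      have h1 : PySem.Chars.strIsdigit (l.drop j) = true ↔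
          (l.drop j ≠ [] ∧ ∀ c ∈ l.drop j, PySem.Chars.isdigit c = true) := by
        simp [PySem.Chars.strIsdigit, List.all_eq_true]
      rw [h1, pv_digitRun_iff l j (by omega)]
      unfold pvJs
      rw [List.mem_append, pv_mem_first]
      constructor
      · rintro ⟨hne, hi⟩
        exact Or.inl ⟨hi, by omega⟩
      · rintro (⟨hi, _⟩ | hmem)
        · exact ⟨hne, hi⟩
        · split at hmem
          · rename_i hg
            simp only [List.mem_singleton] at hmem
            have : l[j] = '-' := by rw [← hgetD, hmem]; exact hg.2.2
            exact absurd this hc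
          · simp at hmem
lemma pvCond_iff (label r : String) :
    pvCond label r = true ↔ ∃ j ∈ pvJs label.toList, r.toList = label.toList.take j := by
  have esuf : (PySem.Str.slice label (some (PySem.Str.len r)) none).toList
      = label.toList.drop r.toList.length := by
    rw [PySem.Str.toList_slice, PySem.Chars.slice_eq_listSlice]
    exact PySem.List.slice_from_natCast label.toList r.toList.length
  have e1 : (PySem.Str.startswith label r = true) ↔ r.toList <+: label.toList := by
    rw [PySem.Str.startswith]; exact PySem.Chars.startswith_iff _ _
  have e2 : (PySem.Str.slice label (some (PySem.Str.len r)) none = "")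
      ↔ label.toList.drop r.toList.length = [] := by
    rw [← String.toList_eq_nil_iff, esuf]
  have e3 : PySem.Str.startswith (PySem.Str.slice label (some (PySem.Str.len r)) none) "-"
      = PySem.Chars.startswith (label.toList.drop r.toList.length) ['-'] := by
    rw [PySem.Str.startswith, esuf]
    rfl
  have e4 : PySem.Str.strIsdigit (if PySem.Str.startswith (PySem.Str.slice label (some (PySem.Str.len r)) none) "-" = true
        then PySem.Str.slice (PySem.Str.slice label (some (PySem.Str.len r)) none) (some 1) none
        else PySem.Str.slice label (some (PySem.Str.len r)) none)
      = PySem.Chars.strIsdigit (if PySem.Chars.startswith (label.toList.drop r.toList.length) ['-'] = true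
        then (label.toList.drop r.toList.length).tail
        else label.toList.drop r.toList.length) := by
    rw [PySem.Str.strIsdigit_eq, apply_ite String.toList, esuf, e3,
      PySem.Str.toList_slice, PySem.Chars.slice_eq_listSlice, PySem.List.slice_from_one, esuf]
  simp only [pvCond, Bool.and_eq_true, Bool.or_eq_true, decide_eq_true_eq, e1, e2, e4]
  constructor
  · rintro ⟨hpre, hcond⟩
    exact ⟨r.toList.length,
      (pv_cond_chars_iff label.toList _ hpre.length_le).mp hcond,
      List.prefix_iff_eq_take.mp hpre⟩
  · rintro ⟨j, hjmem, heq⟩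
    have hj : j ≤ label.toList.length := pv_mem_pvJs_le label.toList j hjmem
    have hlen : r.toList.length = j := by rw [heq, List.length_take]; omega
    refine ⟨by rw [heq]; exact List.take_prefix j label.toList, ?_⟩
    rw [hlen]
    exact (pv_cond_chars_iff label.toList j hj).mpr hjmem


-- B's descending search is the first-hit scan of the descending position list
lemma pvSearchDown_eq (S : PySem.Set String) (l : List Char) (i : Nat) : ∀ j, i ≤ j →
    pvSearchDown S l i j =
      ((List.range (j + 1 - i)).map (fun k => j - k)).findSome?
        (fun j' => if PySem.Set.contains S (String.ofList (l.take j')) then some (String.ofList (l.take j')) else none) := by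
  intro j
  induction j using Nat.strong_induction_on with
  | _ j ih =>
    intro hij
    rw [pvSearchDown]
    have hrange : (List.range (j + 1 - i)).map (fun k => j - k)
        = j :: (List.range (j - i)).map (fun k => (j - 1) - k) := by
      rw [show j + 1 - i = (j - i) + 1 by omega, List.range_succ_eq_map]
      simp only [List.map_cons, List.map_map, Nat.sub_zero]
      refine congrArg₂ _ rfl (List.map_congr_left ?_)
      intro k hk
      simp only [Function.comp_apply]
      simp at hk
      omega
    rw [hrange]
    simp only [List.findSome?]
    by_cases hc : PySem.Set.contains S (String.ofList (l.take j)) = true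
    · simp only [if_pos hc]
    · simp only [if_neg hc]
      by_cases hji : j ≤ i
      · rw [if_pos hji, show j - i = 0 from by omega]
        simp only [List.range_zero, List.map_nil, List.findSome?_nil]
      · rw [if_neg hji, ih (j-1) (by omega) (by omega),
          show j - 1 + 1 - i = j - i by omega]

lemma pvMatchLabelB_eq (S : PySem.Set String) (label : String) :
    pvMatchLabelB S label =
      (pvJs label.toList).findSome?
        (fun j' => if PySem.Set.contains S (String.ofList (label.toList.take j')) then some (String.ofList (label.toList.take j')) else none) := by
  unfold pvMatchLabelB pvJs
  dsimp only
  rw [pvSearchDown_eq S label.toList _ label.toList.length (pvDigitRunStart_le _ _),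
    List.findSome?_append]
  cases ho : ((List.range (label.toList.length + 1 - pvDigitRunStart label.toList label.toList.length)).map
      (fun k => label.toList.length - k)).findSome?
        (fun j' => if PySem.Set.contains S (String.ofList (label.toList.take j')) then some (String.ofList (label.toList.take j')) else none) with
  | some r => rfl
  | none =>
    simp only [Option.none_or]
    by_cases hg : 0 < pvDigitRunStart label.toList label.toList.length ∧
        pvDigitRunStart label.toList label.toList.length < label.toList.length ∧
        label.toList.getD (pvDigitRunStart label.toList label.toList.length - 1) ' ' = '-'
    · rw [if_pos hg]
      by_cases hc : PySem.Set.contains S (String.ofList (label.toList.take (pvDigitRunStart label.toList label.toList.length - 1))) = true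
      · rw [if_pos ⟨hg.1, hg.2.1, hg.2.2, hc⟩]
        have hc' : String.ofList (label.toList.take (pvDigitRunStart label.toList label.toList.length - 1)) ∈ S :=
          List.contains_iff_mem.mp hc
        simp only [String.length_toList] at hc'
        simp [List.findSome?, hc']
      · rw [if_neg (by tauto)]
        have hc' : String.ofList (label.toList.take (pvDigitRunStart label.toList label.toList.length - 1)) ∉ S :=
          fun h => hc (List.contains_iff_mem.mpr h)
        simp only [String.length_toList] at hc'
        simp [List.findSome?, hc']
    · rw [if_neg hg, if_neg (by tauto)]
      rfl

lemma pv_findSome?_if (p : Nat → Bool) (f : Nat → String) (js : List Nat) :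
    js.findSome? (fun j => if p j then some (f j) else none) = (js.find? p).map f := by
  induction js with
  | nil => rfl
  | cons j t ih =>
    simp only [List.findSome?, List.find?]
    by_cases h : p j <;> simp [h, ih]

-- first match in a list sorted by length descending is the unique longest match
lemma pv_find?_sorted_desc (p : String → Bool) (rs : List String)
    (hs : rs.Pairwise (fun a b => PySem.Str.len b ≤ PySem.Str.len a))
    (r : String) (hmem : r ∈ rs) (hp : p r = true)
    (hmax : ∀ r' ∈ rs, p r' = true → r'.toList.length < r.toList.length ∨ r' = r) :
    rs.find? p = some r := by
  induction rs with
  | nil => simp at hmem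
  | cons a t ih =>
    obtain ⟨ha, ht⟩ := List.pairwise_cons.mp hs
    by_cases hpa : p a = true
    · rw [List.find?_cons_of_pos hpa]
      rcases hmax a List.mem_cons_self hpa with hlt | heq
      · rcases List.mem_cons.mp hmem with rfl | hmemt
        · omega
        · have := ha r hmemt
          simp only [PySem.Str.len_eq] at this
          omega
      · rw [heq]
    · rw [List.find?_cons_of_neg (by simpa using hpa)]
      rcases List.mem_cons.mp hmem with rfl | hmemt
      · exact absurd hp hpa
      · exact ih ht hmemt (fun r' hr' hpr' => hmax r' (List.mem_cons_of_mem _ hr') hpr')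

-- the matchers agree
lemma pv_matcher_eq (label : String) (regions : List String) :
    pvMatchRegionLabel label (PySem.List.sorted (PySem.Set.ofList regions) PySem.Str.len true)
      = pvMatchLabelB (PySem.Set.ofList regions) label := by
  rw [pvMatch_eq_find?, pvMatchLabelB_eq, pv_findSome?_if]
  cases hf : (pvJs label.toList).find? (fun j => PySem.Set.contains (PySem.Set.ofList regions) (String.ofList (label.toList.take j))) with
  | none =>
    rw [List.find?_eq_none] at hf
    rw [Option.map_none, List.find?_eq_none]
    intro r hr hc
    obtain ⟨j, hjmem, heq⟩ := (pvCond_iff label r).mp hc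
    refine hf j hjmem ?_
    rw [← heq, String.ofList_toList]
    exact List.contains_iff_mem.mpr ((PySem.List.mem_sorted _ _ _ r).mp hr)
  | some jm =>
    rw [Option.map_some]
    obtain ⟨hgood, as, bs, happ, hprev⟩ := List.find?_eq_some_iff_append.mp hf
    have hjmmem : jm ∈ pvJs label.toList := by rw [happ]; exact List.mem_append.mpr (Or.inr List.mem_cons_self)
    have hjmle : jm ≤ label.toList.length := pv_mem_pvJs_le _ _ hjmmem
    have hmemS : String.ofList (label.toList.take jm) ∈ PySem.Set.ofList regions :=
      List.contains_iff_mem.mp hgood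
    refine pv_find?_sorted_desc (pvCond label) _ (PySem.List.sorted_pairwise_rev _ _) _
      ((PySem.List.mem_sorted _ _ _ _).mpr hmemS)
      ((pvCond_iff label _).mpr ⟨jm, hjmmem, String.toList_ofList⟩) ?_
    intro r' hr' hc'
    obtain ⟨j', hj'mem, heq'⟩ := (pvCond_iff label r').mp hc'
    have hgood' : PySem.Set.contains (PySem.Set.ofList regions) (String.ofList (label.toList.take j')) = true := by
      rw [← heq', String.ofList_toList]
      exact List.contains_iff_mem.mpr ((PySem.List.mem_sorted _ _ _ r').mp hr')
    have hj'le : j' ≤ label.toList.length := pv_mem_pvJs_le _ _ hj'mem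
    rw [happ] at hj'mem
    rcases List.mem_append.mp hj'mem with hj'as | hj'cons
    · exact absurd hgood' (by simpa using hprev _ hj'as)
    · rcases List.mem_cons.mp hj'cons with rfl | hj'bs
      · refine Or.inr ?_
        rw [← String.ofList_toList (s := r'), heq']
      · refine Or.inl ?_
        have hpw := pv_pairwise_pvJs label.toList
        rw [happ, List.pairwise_append] at hpw
        have hlt : j' < jm := (List.pairwise_cons.mp hpw.2.1).1 j' hj'bs
        rw [heq', String.toList_ofList, List.length_take, List.length_take]
        omega

-- ===== VERDICT (by name: the statement is the Claim_ definition above) =====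
set_option maxHeartbeats 1000000 in
theorem extract_voice_domains_spec : Claim_equal_extract_voice_domains := by
  intro domains regions _
  unfold Spec_extract_voice_domains extract_voice_domains extract_voice_domains_alt
  dsimp only
  refine congrArg PySem.Dict.items (List.foldl_ext _ _ _ ?_)
  intro d host _
  dsimp only
  rw [pv_matcher_eq]
  rfl
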